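-- pv_equiv track=rewrite | github.com/jlrzhen/bannerbrawl | src/gamekeeper.py | color_string
-- ===== SOURCE A (Python) =====
-- def color_string(htmlstring, color):
--     escapes = {'\"': '&quot;',
--                '\'': '&#39;',
--                '<': '&lt;',
--                '>': '&gt;'}
--     # This is done first to prevent escaping other escapes.
--     htmlstring = htmlstring.replace('&', '&amp;')
--     for seq, esc in escapes.items():
--         htmlstring = htmlstring.replace(seq, esc)
--     return f"<span class=\"text-{color}\">{htmlstring}</span>"
-- ===== SOURCE B (Python) =====
-- def color_string(htmlstring, color):
--     escapes = {'&': '&amp;',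
--                '"': '&quot;',
--                "'": '&#39;',
--                '<': '&lt;',
--                '>': '&gt;'}
--     parts = [escapes.get(ch, ch) for ch in htmlstring]
--     return f"<span class=\"text-{color}\">{''.join(parts)}</span>"
-- ===== Notes on version B (the rewrite author's own statement) =====
-- stated objective: simpler
-- what changed: Replaces A's five sequential full-string .replace passes with one pass over the characters through a single escape dict ('&' included so each character is mapped exactly once, preserving the no-double-escape order trick).
import Mathlib
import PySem

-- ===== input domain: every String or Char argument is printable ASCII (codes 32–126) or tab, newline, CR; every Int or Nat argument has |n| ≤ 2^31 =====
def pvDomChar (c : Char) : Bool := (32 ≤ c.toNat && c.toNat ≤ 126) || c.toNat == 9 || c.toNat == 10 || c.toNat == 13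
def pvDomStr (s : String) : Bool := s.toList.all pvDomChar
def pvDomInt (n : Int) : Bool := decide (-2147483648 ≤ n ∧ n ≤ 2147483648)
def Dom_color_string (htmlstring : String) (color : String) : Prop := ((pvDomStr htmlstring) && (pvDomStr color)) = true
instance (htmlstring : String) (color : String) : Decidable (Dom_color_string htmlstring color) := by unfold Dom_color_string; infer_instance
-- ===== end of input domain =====

-- B replaces A's five sequential full-string replace passes with one per-character pass
-- through a single escape dictionary (objective: simpler).


-- ===== PORT A =====
def color_string (htmlstring : String) (color : String) : String :=
  let escapes : PySem.Dict String String :=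
    ((((PySem.Dict.empty.insert "\"" "&quot;").insert "'" "&#39;").insert "<" "&lt;").insert ">" "&gt;")
  -- This is done first to prevent escaping other escapes.
  let htmlstring := PySem.Str.replace htmlstring "&" "&amp;"
  let htmlstring := escapes.items.foldl (fun h (p : String × String) => PySem.Str.replace h p.1 p.2) htmlstring
  "<span class=\"text-" ++ color ++ "\">" ++ htmlstring ++ "</span>"

-- ===== PORT B =====
def color_string_alt (htmlstring : String) (color : String) : String :=
  let escapes : PySem.Dict Char String :=
    (((((PySem.Dict.empty.insert '&' "&amp;").insert '"' "&quot;").insert '\'' "&#39;").insert '<' "&lt;").insert '>' "&gt;")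
  let parts := htmlstring.toList.map (fun ch => escapes.getD ch (String.ofList [ch]))
  "<span class=\"text-" ++ color ++ "\">" ++ PySem.Str.join "" parts ++ "</span>"

-- ===== PRECONDITION & SPEC =====
def Spec_color_string (htmlstring : String) (color : String) (out : String) : Prop := out = color_string_alt htmlstring color
instance (htmlstring : String) (color : String) (out : String) : Decidable (Spec_color_string htmlstring color out) := by unfold Spec_color_string; infer_instance

-- ===== CLAIM (what is proved, stated in full; the proofs are below) =====
def Claim_equal_color_string : Prop := ∀ (htmlstring : String) (color : String), Dom_color_string htmlstring color → Spec_color_string htmlstring color (color_string htmlstring color)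

-- ===== LEMMAS AND PROOFS =====

-- single-character pattern replace is a per-character flatMap
theorem replace_go_single (a : Char) (new : List Char) (l acc : List Char) (fuel : Nat)
    (h : l.length ≤ fuel) :
    PySem.Chars.replace.go [a] new fuel l acc
      = acc.reverse ++ l.flatMap (fun c => if c = a then new else [c]) := by
  induction l generalizing fuel acc with
  | nil => cases fuel <;> simp [PySem.Chars.replace.go]
  | cons c t ih =>
    cases fuel with
    | zero => simp at h
    | succ fuel =>
      simp only [List.length_cons] at h
      by_cases hc : c = a
      · subst hc
        have hstep : PySem.Chars.replace.go [c] new (fuel + 1) (c :: t) acc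
            = PySem.Chars.replace.go [c] new fuel t (new.reverse ++ acc) := by
          simp [PySem.Chars.replace.go, List.isPrefixOf]
        rw [hstep, ih _ _ (by omega)]
        simp
      · have hstep : PySem.Chars.replace.go [a] new (fuel + 1) (c :: t) acc
            = PySem.Chars.replace.go [a] new fuel t (c :: acc) := by
          simp [PySem.Chars.replace.go, List.isPrefixOf, Ne.symm hc]
        rw [hstep, ih _ _ (by omega)]
        simp [hc]

theorem replace_single (s : List Char) (a : Char) (new : List Char) :
    PySem.Chars.replace s [a] new = s.flatMap (fun c => if c = a then new else [c]) := by
  rw [PySem.Chars.replace, if_neg (by simp)]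
  simpa using replace_go_single a new s [] s.length le_rfl

-- the per-character mapping both programs amount to
def escFun (c : Char) : List Char :=
  if c = '&' then "&amp;".toList else if c = '"' then "&quot;".toList
  else if c = '\'' then "&#39;".toList else if c = '<' then "&lt;".toList
  else if c = '>' then "&gt;".toList else [c]

theorem flatMap_congr' {l : List Char} {f g : Char → List Char} (h : ∀ c, f c = g c) :
    l.flatMap f = l.flatMap g := by
  induction l with
  | nil => rfl
  | cons a t ih => simp only [List.flatMap_cons, h, ih]

theorem join_nil_eq_flatten (L : List (List Char)) : PySem.Chars.join [] L = L.flatten := by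
  induction L with
  | nil => simp [PySem.Chars.join_nil]
  | cons a t ih =>
    cases t with
    | nil => simp [PySem.Chars.join_singleton]
    | cons b u => rw [PySem.Chars.join_cons_cons]; simp [ih]

-- composing the five single-character substitutions, per character
theorem perchar (c : Char) :
    List.flatMap
      (fun x2 =>
        List.flatMap
          (fun x3 =>
            List.flatMap
              (fun x4 =>
                List.flatMap (fun x5 => if x5 = '>' then ("&gt;" : String).toList else [x5])
                  (if x4 = '<' then ("&lt;" : String).toList else [x4]))
              (if x3 = '\'' then ("&#39;" : String).toList else [x3]))
          (if x2 = '"' then ("&quot;" : String).toList else [x2]))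
      (if c = '&' then ("&amp;" : String).toList else [c]) = escFun c := by
  by_cases h1 : c = '&'; · subst h1; decide
  by_cases h2 : c = '"'; · subst h2; decide
  by_cases h3 : c = '\''; · subst h3; decide
  by_cases h4 : c = '<'; · subst h4; decide
  by_cases h5 : c = '>'; · subst h5; decide
  simp [escFun, h1, h2, h3, h4, h5]

-- A's five replace passes collapse to one flatMap of escFun
theorem chainA (l : List Char) :
    PySem.Chars.replace
      (PySem.Chars.replace
        (PySem.Chars.replace
          (PySem.Chars.replace
            (PySem.Chars.replace l ("&" : String).toList ("&amp;" : String).toList)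
            ("\"" : String).toList ("&quot;" : String).toList)
          ("'" : String).toList ("&#39;" : String).toList)
        ("<" : String).toList ("&lt;" : String).toList)
      (">" : String).toList ("&gt;" : String).toList
    = l.flatMap escFun := by
  rw [show ("&" : String).toList = ['&'] from rfl, show ("\"" : String).toList = ['"'] from rfl,
    show ("'" : String).toList = ['\''] from rfl, show ("<" : String).toList = ['<'] from rfl,
    show (">" : String).toList = ['>'] from rfl]
  rw [replace_single, replace_single, replace_single, replace_single, replace_single]
  simp only [List.flatMap_assoc]
  exact flatMap_congr' perchar

-- B's dictionary lookup, per character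
theorem getD_escapes (ch : Char) :
    ((((((PySem.Dict.empty.insert '&' "&amp;").insert '"' "&quot;").insert '\'' "&#39;").insert
        '<' "&lt;").insert '>' "&gt;" : PySem.Dict Char String).getD ch (String.ofList [ch])).toList
      = escFun ch := by
  by_cases h1 : ch = '&'
  · subst h1; simp [PySem.Dict.getD, PySem.Dict.get?, PySem.Dict.insert, PySem.Dict.empty, escFun]
  by_cases h2 : ch = '"'
  · subst h2; simp [PySem.Dict.getD, PySem.Dict.get?, PySem.Dict.insert, PySem.Dict.empty, escFun]
  by_cases h3 : ch = '\''
  · subst h3; simp [PySem.Dict.getD, PySem.Dict.get?, PySem.Dict.insert, PySem.Dict.empty, escFun]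
  by_cases h4 : ch = '<'
  · subst h4; simp [PySem.Dict.getD, PySem.Dict.get?, PySem.Dict.insert, PySem.Dict.empty, escFun]
  by_cases h5 : ch = '>'
  · subst h5; simp [PySem.Dict.getD, PySem.Dict.get?, PySem.Dict.insert, PySem.Dict.empty, escFun]
  have e1 : ('&' == ch) = false := beq_eq_false_iff_ne.mpr (Ne.symm h1)
  have e2 : ('"' == ch) = false := beq_eq_false_iff_ne.mpr (Ne.symm h2)
  have e3 : ('\'' == ch) = false := beq_eq_false_iff_ne.mpr (Ne.symm h3)
  have e4 : ('<' == ch) = false := beq_eq_false_iff_ne.mpr (Ne.symm h4)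
  have e5 : ('>' == ch) = false := beq_eq_false_iff_ne.mpr (Ne.symm h5)
  simp [PySem.Dict.getD, PySem.Dict.get?, PySem.Dict.insert, PySem.Dict.empty,
    escFun, e1, e2, e3, e4, e5, h1, h2, h3, h4, h5, String.toList_ofList]

-- the escaped middle string is the same in both programs
theorem middle_eq (s : String) :
    PySem.Str.replace
      (PySem.Str.replace
        (PySem.Str.replace
          (PySem.Str.replace (PySem.Str.replace s "&" "&amp;") "\"" "&quot;")
          "'" "&#39;")
        "<" "&lt;")
      ">" "&gt;"
    = PySem.Str.join ""
        (s.toList.map (fun ch =>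
          ((((((PySem.Dict.empty.insert '&' "&amp;").insert '"' "&quot;").insert '\''
              "&#39;").insert '<' "&lt;").insert '>' "&gt;" : PySem.Dict Char String).getD ch
            (String.ofList [ch])))) := by
  refine String.toList_inj.mp ?_
  rw [PySem.Str.toList_join, show ("" : String).toList = [] from rfl, join_nil_eq_flatten]
  simp only [PySem.Str.toList_replace, List.map_map]
  rw [chainA, ← List.flatMap_def]
  exact flatMap_congr' (fun c => (getD_escapes c).symm)

-- ===== VERDICT (by name: the statement is the Claim_ definition above) =====
theorem color_string_spec : Claim_equal_color_string := by
  intro htmlstring color _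
  unfold Spec_color_string color_string color_string_alt
  have hitems :
      ((((PySem.Dict.empty.insert "\"" "&quot;").insert "'" "&#39;").insert "<" "&lt;").insert
          ">" "&gt;" : PySem.Dict String String).items
        = [("\"", "&quot;"), ("'", "&#39;"), ("<", "&lt;"), (">", "&gt;")] := by
    simp [PySem.Dict.insert, PySem.Dict.empty, PySem.Dict.contains]
  simp only [hitems, List.foldl_cons, List.foldl_nil]
  rw [middle_eq]
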